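-- pv_equiv track=rewrite | github.com/suno9234/Coding__ | Python/프로그래머스/lv2_땅따먹기.py | solution
-- ===== SOURCE A (Python) =====
-- def solution(land):
--     answer = 0
--     if len(land)==1:
--         return max(land[0])
--     else:
--         last = 0
--         for l in range(len(land)-1):
--             mylist=[]
--             for i in range(4):
--                 temp = land[l+1][i]
--                 for j in range(4):
--                     if i!=j:
--                         if temp< land[l+1][i]+land[l][j]:
--                             temp =land[l+1][i]+land[l][j]
--                 land[l+1][i]=temp
--
--
--     answer = max(land[len(land)-1])
--     return answer
-- ===== SOURCE B (Python) =====
-- def solution(land):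
--     """Max-sum DP over an N x 4 grid, never taking the same column twice in a row.
--
--     Instead of comparing each cell against all other columns, keep the running
--     totals and combine each new row with the top two of the previous totals
--     (Kadane-style: a column restarts from its own value when no previous total
--     is positive).
--     """
--     if len(land) == 1:
--         return max(land[0])
--     dp = land[0]
--     for row in land[1:]:
--         m1 = max(dp)
--         a = dp.index(m1)
--         m2 = max(dp[:a] + dp[a + 1:])
--         dp = [row[i] + max(0, m2 if i == a else m1) for i in range(4)]
--     return max(dp)
-- ===== Notes on version B (the rewrite author's own statement) =====
-- stated objective: alternative
-- what changed: A augments each of the 4 cells of the next row by a fresh 4x4 comparison scan of the previous row, mutating land in place; B keeps a running-totals list and per row does a single top-two (max/argmax/second-max) scan, adding the best other-column total (Kadane-style reset to 0 when all totals are negative); Pre_ restricts to the problem's natural N x 4 grids, excluding short rows (A raises IndexError) and rows longer than 4, where A's final max also covers columns its loop never updated.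
-- outside the precondition, e.g. on solution([[1, 2, 3, 4, 100], [1, 2, 3, 4, 100]]): A returns 100, B returns 104
import Mathlib
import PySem

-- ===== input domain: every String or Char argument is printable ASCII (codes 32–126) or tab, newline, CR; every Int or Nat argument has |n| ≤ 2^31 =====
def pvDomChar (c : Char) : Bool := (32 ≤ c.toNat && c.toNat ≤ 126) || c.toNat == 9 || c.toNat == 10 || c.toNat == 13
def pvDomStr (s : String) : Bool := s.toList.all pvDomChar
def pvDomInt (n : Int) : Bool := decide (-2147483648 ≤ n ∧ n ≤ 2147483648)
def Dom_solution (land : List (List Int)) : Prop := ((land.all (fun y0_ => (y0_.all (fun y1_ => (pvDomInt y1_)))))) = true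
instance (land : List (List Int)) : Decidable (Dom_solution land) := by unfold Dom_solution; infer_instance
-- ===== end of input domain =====

-- B replaces A's 4×4 inner comparison scan per row by one top-two (max/argmax/second-max) scan
-- of the running totals; A mutates `land` in place, B does not — the equivalence claimed is
-- about the return value only.

-- ===== PORT A =====
-- inner `for j in range(4)` loop of A (temp accumulation), verbatim
def pvCol (prev cur : List Int) (i : Nat) : Int :=
  (List.range 4).foldl (fun temp j =>
    if i ≠ j then
      if temp < cur.getD i 0 + prev.getD j 0 then cur.getD i 0 + prev.getD j 0 else temp
    else temp) (cur.getD i 0)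

-- one iteration of A's outer `for l in range(len(land)-1)` loop: mutate row l+1 in place
def pvStepRow (st : List (List Int)) (l : Nat) : List (List Int) :=
  (List.range 4).foldl (fun st i =>
    st.set (l+1) ((st.getD (l+1) []).set i (pvCol (st.getD l []) (st.getD (l+1) []) i))) st

def solution (land : List (List Int)) : Int :=
  if land.length = 1 then (PySem.List.max? (land.getD 0 []) (fun y => y)).getD 0
  else
    let final := (List.range (land.length - 1)).foldl pvStepRow land
    (PySem.List.max? (final.getD (final.length - 1) []) (fun y => y)).getD 0

-- ===== PORT B =====
-- one iteration of B's `for row in land[1:]` loop; state = dp (the running totals)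
def pvBStep (dp : List Int) (row : List Int) : List Int :=
  let m1 := (PySem.List.max? dp (fun y => y)).getD 0
  let a := (PySem.List.index? dp m1).getD 0
  let m2 := (PySem.List.max? (dp.take a ++ dp.drop (a+1)) (fun y => y)).getD 0
  (List.range 4).map (fun i => row.getD i 0 + max 0 (if i = a then m2 else m1))

def solution_alt (land : List (List Int)) : Int :=
  if land.length = 1 then (PySem.List.max? (land.getD 0 []) (fun y => y)).getD 0
  else (PySem.List.max? ((land.drop 1).foldl pvBStep (land.getD 0 [])) (fun y => y)).getD 0

-- ===== PRECONDITION & SPEC =====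
-- Pre_ restricts the multi-row case to the problem's natural domain of N×4 grids: A raises
-- (IndexError) when some row is shorter than 4 or land is empty (ValueError on a single empty
-- row), and on rows longer than 4 A's final max also ranges over columns its loop never
-- updated, an artefact of the in-place mutation that a 4-column solver does not reproduce.
def Pre_solution (land : List (List Int)) : Prop :=
  land ≠ [] ∧ (if land.length = 1 then land.getD 0 [] ≠ [] else ∀ r ∈ land, r.length = 4)
instance (land : List (List Int)) : Decidable (Pre_solution land) := by unfold Pre_solution; infer_instance

def pvWitness_solution : List (List Int) := [[1, 2, 3, 5], [5, 6, 7, 8], [4, 3, 2, 1]]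

def Spec_solution (land : List (List Int)) (out : Int) : Prop := out = solution_alt land
instance (land : List (List Int)) (out : Int) : Decidable (Spec_solution land out) := by unfold Spec_solution; infer_instance

-- ===== CLAIM (what is proved, stated in full; the proofs are below) =====
def Claim_equal_solution : Prop := ∀ (land : List (List Int)), Dom_solution land → Pre_solution land → Spec_solution land (solution land)

-- ===== LEMMAS AND PROOFS =====

-- A's per-row combination: what pvStepRow does to row l+1, extracted
def pvComb (prev c : List Int) : List Int :=
  (List.range 4).foldl (fun row i => row.set i (pvCol prev row i)) c

-- A's whole loop as structural recursion on the remaining rows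
def pvARec (r : List Int) : List (List Int) → List (List Int)
  | [] => [r]
  | c :: cs => r :: pvARec (pvComb r c) cs

theorem pv_getD_app (done t : List (List Int)) (k : Nat) :
    (done ++ t).getD (done.length + k) [] = t.getD k [] := by
  induction done with
  | nil => simp
  | cons a l ih => simpa [Nat.succ_add] using ih

theorem pv_set_app (done t : List (List Int)) (k : Nat) (v : List Int) :
    (done ++ t).set (done.length + k) v = done ++ t.set k v := by
  induction done with
  | nil => simp
  | cons a l ih => simp [Nat.succ_add, ih]

theorem pv_gA (done : List (List Int)) (x y : List Int) (rest : List (List Int)) :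
    (done ++ x :: y :: rest).getD done.length [] = x := by
  simpa using pv_getD_app done (x :: y :: rest) 0

theorem pv_gB (done : List (List Int)) (x y : List Int) (rest : List (List Int)) :
    (done ++ x :: y :: rest).getD (done.length + 1) [] = y := by
  simpa using pv_getD_app done (x :: y :: rest) 1

theorem pv_sB (done : List (List Int)) (x y : List Int) (rest : List (List Int)) (v : List Int) :
    (done ++ x :: y :: rest).set (done.length + 1) v = done ++ x :: v :: rest := by
  simpa using pv_set_app done (x :: y :: rest) 1 v

theorem pv_stepRow_append (done : List (List Int)) (r c : List Int) (rest : List (List Int)) :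
    pvStepRow (done ++ r :: c :: rest) done.length = done ++ r :: pvComb r c :: rest := by
  simp only [pvStepRow, pvComb, show List.range 4 = [0,1,2,3] from rfl,
    List.foldl_cons, List.foldl_nil, pv_gA, pv_gB, pv_sB]

theorem pv_Afold (rest : List (List Int)) : ∀ (done : List (List Int)) (r : List Int),
    (List.range' done.length rest.length 1).foldl pvStepRow (done ++ r :: rest)
      = done ++ pvARec r rest := by
  induction rest with
  | nil => intro done r; simp [pvARec]
  | cons c cs ih =>
    intro done r
    rw [List.length_cons, List.range'_succ, List.foldl_cons, pv_stepRow_append]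
    have h := ih (done ++ [r]) (pvComb r c)
    simp only [List.length_append, List.length_cons, List.length_nil, Nat.zero_add] at h
    simpa [pvARec, List.append_assoc] using h

theorem pv_length_pvARec (rest : List (List Int)) : ∀ r, (pvARec r rest).length = rest.length + 1 := by
  induction rest with
  | nil => intro r; simp [pvARec]
  | cons c cs ih => intro r; simp [pvARec, ih]

theorem pv_pvARec_getD (rest : List (List Int)) : ∀ r,
    (pvARec r rest).getD rest.length [] = rest.foldl pvComb r := by
  induction rest with
  | nil => intro r; simp [pvARec]
  | cons c cs ih => intro r; simpa [pvARec] using ih (pvComb r c)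

-- closed forms of A's inner loop, one per column
theorem pv_col0 (p0 p1 p2 p3 : Int) (pr : List Int) (cur : List Int) :
    pvCol (p0::p1::p2::p3::pr) cur 0 = cur.getD 0 0 + max 0 (max (max p1 p2) p3) := by
  simp only [pvCol, show List.range 4 = [0,1,2,3] from rfl, List.foldl_cons, List.foldl_nil,
    List.getD_cons_zero, List.getD_cons_succ]
  norm_num
  split_ifs <;> omega

theorem pv_col1 (p0 p1 p2 p3 : Int) (pr : List Int) (cur : List Int) :
    pvCol (p0::p1::p2::p3::pr) cur 1 = cur.getD 1 0 + max 0 (max (max p0 p2) p3) := by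
  simp only [pvCol, show List.range 4 = [0,1,2,3] from rfl, List.foldl_cons, List.foldl_nil,
    List.getD_cons_zero, List.getD_cons_succ]
  norm_num
  split_ifs <;> omega

theorem pv_col2 (p0 p1 p2 p3 : Int) (pr : List Int) (cur : List Int) :
    pvCol (p0::p1::p2::p3::pr) cur 2 = cur.getD 2 0 + max 0 (max (max p0 p1) p3) := by
  simp only [pvCol, show List.range 4 = [0,1,2,3] from rfl, List.foldl_cons, List.foldl_nil,
    List.getD_cons_zero, List.getD_cons_succ]
  norm_num
  split_ifs <;> omega

theorem pv_col3 (p0 p1 p2 p3 : Int) (pr : List Int) (cur : List Int) :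
    pvCol (p0::p1::p2::p3::pr) cur 3 = cur.getD 3 0 + max 0 (max (max p0 p1) p2) := by
  simp only [pvCol, show List.range 4 = [0,1,2,3] from rfl, List.foldl_cons, List.foldl_nil,
    List.getD_cons_zero, List.getD_cons_succ]
  norm_num
  split_ifs <;> omega

theorem pv_comb_closed (p0 p1 p2 p3 : Int) (pr : List Int) (c0 c1 c2 c3 : Int) (cr : List Int) :
    pvComb (p0::p1::p2::p3::pr) (c0::c1::c2::c3::cr)
      = (c0 + max 0 (max (max p1 p2) p3)) :: (c1 + max 0 (max (max p0 p2) p3))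
        :: (c2 + max 0 (max (max p0 p1) p3)) :: (c3 + max 0 (max (max p0 p1) p2)) :: cr := by
  simp [pvComb, show List.range 4 = [0,1,2,3] from rfl,
    pv_col0, pv_col1, pv_col2, pv_col3, List.set]

theorem pv_row_eq' (p0 p1 p2 p3 : Int) (c0 c1 c2 c3 : Int) (cr : List Int) :
    pvBStep [p0,p1,p2,p3] (c0::c1::c2::c3::cr)
      = [(c0 + max 0 (max (max p1 p2) p3)), (c1 + max 0 (max (max p0 p2) p3)),
         (c2 + max 0 (max (max p0 p1) p3)), (c3 + max 0 (max (max p0 p1) p2))] := by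
  simp only [pvBStep]
  rw [PySem.List.max?_id_cons]
  simp only [List.foldl_cons, List.foldl_nil, Option.getD_some]
  set m1 := max (max (max p0 p1) p2) p3 with hm1
  by_cases h0 : p0 = m1
  · rw [← h0, PySem.List.index?_cons_self]
    simp only [Option.getD_some, List.take_zero, List.nil_append, List.drop_succ_cons, List.drop_zero]
    rw [PySem.List.max?_id_cons]
    simp only [List.foldl_cons, List.foldl_nil, Option.getD_some,
      show List.range 4 = [0,1,2,3] from rfl, List.map_cons, List.map_nil]
    norm_num
    omega
  · rw [PySem.List.index?_cons_of_ne _ h0]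
    by_cases h1 : p1 = m1
    · rw [← h1, PySem.List.index?_cons_self]
      simp only [Option.map_some, Option.getD_some]
      rw [show ([p0,p1,p2,p3].take 1 ++ [p0,p1,p2,p3].drop 2) = [p0,p2,p3] from rfl,
        PySem.List.max?_id_cons]
      simp only [List.foldl_cons, List.foldl_nil, Option.getD_some,
        show List.range 4 = [0,1,2,3] from rfl, List.map_cons, List.map_nil]
      norm_num
      omega
    · rw [PySem.List.index?_cons_of_ne _ h1]
      by_cases h2 : p2 = m1
      · rw [← h2, PySem.List.index?_cons_self]
        simp only [Option.map_some, Option.getD_some]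
        rw [show ([p0,p1,p2,p3].take 2 ++ [p0,p1,p2,p3].drop 3) = [p0,p1,p3] from rfl,
          PySem.List.max?_id_cons]
        simp only [List.foldl_cons, List.foldl_nil, Option.getD_some,
          show List.range 4 = [0,1,2,3] from rfl, List.map_cons, List.map_nil]
        norm_num
        omega
      · have h3 : p3 = m1 := by omega
        rw [← h3, PySem.List.index?_cons_of_ne _ (h3 ▸ h2), PySem.List.index?_cons_self]
        simp only [Option.map_some, Option.getD_some]
        rw [show ([p0,p1,p2,p3].take 3 ++ [p0,p1,p2,p3].drop 4) = [p0,p1,p2] from rfl,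
          PySem.List.max?_id_cons]
        simp only [List.foldl_cons, List.foldl_nil, Option.getD_some,
          show List.range 4 = [0,1,2,3] from rfl, List.map_cons, List.map_nil]
        norm_num
        omega

theorem pv_row_eq (p0 p1 p2 p3 : Int) (c0 c1 c2 c3 : Int) :
    pvBStep [p0,p1,p2,p3] [c0,c1,c2,c3] = pvComb [p0,p1,p2,p3] [c0,c1,c2,c3] := by
  rw [pv_comb_closed]
  exact pv_row_eq' p0 p1 p2 p3 c0 c1 c2 c3 []

theorem pv_Bfold (rest : List (List Int)) : ∀ (r : List Int), r.length = 4 →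
    (∀ c ∈ rest, c.length = 4) →
    rest.foldl pvBStep r = rest.foldl pvComb r := by
  induction rest with
  | nil => intro r _ _; rfl
  | cons c cs ih =>
    intro r hr hall
    obtain ⟨p0, p1, p2, p3, rfl⟩ : ∃ p0 p1 p2 p3, r = [p0,p1,p2,p3] := by
      match r, hr with
      | [a,b,d,e], _ => exact ⟨a, b, d, e, rfl⟩
    obtain ⟨c0, c1, c2, c3, rfl⟩ : ∃ c0 c1 c2 c3, c = [c0,c1,c2,c3] := by
      have hc : c.length = 4 := hall c List.mem_cons_self
      match c, hc with
      | [a,b,d,e], _ => exact ⟨a, b, d, e, rfl⟩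
    rw [List.foldl_cons, List.foldl_cons, pv_row_eq]
    exact ih _ (by rw [pv_comb_closed]; rfl) (fun x hx => hall x (List.mem_cons_of_mem _ hx))

-- ===== VERDICT (by name: the statement is the Claim_ definition above) =====
theorem solution_spec : Claim_equal_solution := by
  intro land _ hpre
  obtain ⟨hne, hrows⟩ := hpre
  unfold Spec_solution solution solution_alt
  by_cases h1 : land.length = 1
  · simp [h1]
  · simp only [if_neg h1]
    obtain ⟨r, rest, rfl⟩ : ∃ r rest, land = r :: rest := by
      cases land with
      | nil => exact absurd rfl hne
      | cons a t => exact ⟨a, t, rfl⟩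
    simp only [if_neg h1] at hrows
    have hr : r.length = 4 := hrows r List.mem_cons_self
    have hrest : ∀ c ∈ rest, c.length = 4 := fun c hc => hrows c (List.mem_cons_of_mem _ hc)
    have hA : (List.range ((r :: rest).length - 1)).foldl pvStepRow (r :: rest)
        = pvARec r rest := by
      have := pv_Afold rest [] r
      simpa [List.range_eq_range'] using this
    have hgd : (pvARec r rest).getD ((pvARec r rest).length - 1) [] = rest.foldl pvComb r := by
      rw [pv_length_pvARec]
      simpa using pv_pvARec_getD rest r
    rw [hA, hgd, List.drop_one, List.getD_cons_zero]
    rw [show (r :: rest).tail = rest from rfl, pv_Bfold rest r hr hrest]
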